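-- pv_equiv track=rewrite | github.com/toshas/ttnf | src/core/tt_core.py | perf_report_sample_tt_v3
-- ===== SOURCE A (Python) =====
-- def perf_report_sample_tt_v3(input_shapes, tt_core_isparam):
--     bv_dim = None
--     intermediate_sizes = []
--     flops = 0
--     for si in range(0, len(input_shapes)):
--         if not tt_core_isparam[si] and bv_dim is None:
--             continue
--         elif tt_core_isparam[si]:
--             if bv_dim is not None:
--                 flops += 2 * bv_dim * input_shapes[si][2]
--             bv_dim = input_shapes[si][2]
--             intermediate_sizes.append(bv_dim)
--         else:
--             continue
--     out = {
--         'flops': flops,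
--         'size_max_intermediate': max(intermediate_sizes),
--         'size_all_intermediate': sum(intermediate_sizes),
--     }
--     return out
-- ===== SOURCE B (Python) =====
-- def perf_report_sample_tt_v3(input_shapes, tt_core_isparam):
--     dims = [row[2] for row, isp in zip(input_shapes, tt_core_isparam) if isp]
--     flops = sum(2 * a * b for a, b in zip(dims, dims[1:]))
--     return {
--         'flops': flops,
--         'size_max_intermediate': max(dims),
--         'size_all_intermediate': sum(dims),
--     }
-- ===== Notes on version B (the rewrite author's own statement) =====
-- stated objective: simpler
-- what changed: Replaces the single index loop threading an Optional bv_dim accumulator with a filter-then-adjacent-pairs decomposition: build the list of param-core dims once, then flops is a pairwise zip sum and the two sizes are max/sum of that list.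
import Mathlib
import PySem

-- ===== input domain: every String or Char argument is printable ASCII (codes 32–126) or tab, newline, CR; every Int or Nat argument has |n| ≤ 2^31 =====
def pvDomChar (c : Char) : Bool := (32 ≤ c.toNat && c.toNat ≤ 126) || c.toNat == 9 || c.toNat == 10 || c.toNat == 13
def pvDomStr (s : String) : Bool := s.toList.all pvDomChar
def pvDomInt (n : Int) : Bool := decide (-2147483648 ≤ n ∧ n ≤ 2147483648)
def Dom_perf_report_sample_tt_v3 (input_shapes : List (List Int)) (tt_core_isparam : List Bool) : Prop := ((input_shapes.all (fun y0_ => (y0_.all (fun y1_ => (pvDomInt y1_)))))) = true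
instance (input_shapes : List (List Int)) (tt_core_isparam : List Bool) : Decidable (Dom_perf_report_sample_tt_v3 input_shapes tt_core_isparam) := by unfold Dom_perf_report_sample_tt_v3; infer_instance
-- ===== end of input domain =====

-- B replaces A's accumulator-threading index loop by a filter-then-adjacent-pairs decomposition (same cost, plainer code).

-- ===== PORT A =====
-- one loop iteration of A's for-loop body (state = (bv_dim, intermediate_sizes, flops))
def pvStepA (input_shapes : List (List Int)) (tt_core_isparam : List Bool)
    (st : Option Int × List Int × Int) (si : Int) : Option Int × List Int × Int :=
  let isp := PySem.List.pyGetD tt_core_isparam si false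
  if !isp && st.1.isNone then st
  else if isp then
    let d := PySem.List.pyGetD (PySem.List.pyGetD input_shapes si []) 2 0
    let flops' := match st.1 with
      | some v => st.2.2 + 2 * v * d
      | none => st.2.2
    (some d, st.2.1 ++ [d], flops')
  else st

def perf_report_sample_tt_v3 (input_shapes : List (List Int)) (tt_core_isparam : List Bool) : List (String × Int) :=
  let st := (PySem.List.pyRange 0 (input_shapes.length : Int) 1).foldl
    (pvStepA input_shapes tt_core_isparam) (none, [], 0)
  [("flops", st.2.2),
   ("size_max_intermediate", (PySem.List.max? st.2.1 (fun x => x)).getD 0),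
   ("size_all_intermediate", st.2.1.sum)]

-- ===== PORT B =====
def perf_report_sample_tt_v3_alt (input_shapes : List (List Int)) (tt_core_isparam : List Bool) : List (String × Int) :=
  let dims := ((input_shapes.zip tt_core_isparam).filter (fun p => p.2)).map
    (fun p => PySem.List.pyGetD p.1 2 0)
  let flops := ((dims.zip (dims.drop 1)).map (fun p => 2 * p.1 * p.2)).sum
  [("flops", flops),
   ("size_max_intermediate", (PySem.List.max? dims (fun x => x)).getD 0),
   ("size_all_intermediate", dims.sum)]

-- ===== PRECONDITION & SPEC =====
-- Pre_ excludes exactly the inputs where Python A raises: an IndexError when tt_core_isparam is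
-- shorter than input_shapes or a param core has fewer than 3 dims, and a ValueError (max of empty
-- list) when no core is a param core.
def Pre_perf_report_sample_tt_v3 (input_shapes : List (List Int)) (tt_core_isparam : List Bool) : Prop :=
  input_shapes.length ≤ tt_core_isparam.length ∧
  (∀ p ∈ input_shapes.zip tt_core_isparam, p.2 = true → 3 ≤ p.1.length) ∧
  (∃ p ∈ input_shapes.zip tt_core_isparam, p.2 = true)
instance (input_shapes : List (List Int)) (tt_core_isparam : List Bool) : Decidable (Pre_perf_report_sample_tt_v3 input_shapes tt_core_isparam) := by unfold Pre_perf_report_sample_tt_v3; infer_instance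
def pvWitness_perf_report_sample_tt_v3 : List (List Int) × List Bool := ([[1, 2, 3], [4, 5, 6]], [true, true])

def Spec_perf_report_sample_tt_v3 (input_shapes : List (List Int)) (tt_core_isparam : List Bool) (out : List (String × Int)) : Prop := out = perf_report_sample_tt_v3_alt input_shapes tt_core_isparam
instance (input_shapes : List (List Int)) (tt_core_isparam : List Bool) (out : List (String × Int)) : Decidable (Spec_perf_report_sample_tt_v3 input_shapes tt_core_isparam out) := by unfold Spec_perf_report_sample_tt_v3; infer_instance

-- ===== CLAIM (what is proved, stated in full; the proofs are below) =====
def Claim_equal_perf_report_sample_tt_v3 : Prop := ∀ (input_shapes : List (List Int)) (tt_core_isparam : List Bool), Dom_perf_report_sample_tt_v3 input_shapes tt_core_isparam → Pre_perf_report_sample_tt_v3 input_shapes tt_core_isparam → Spec_perf_report_sample_tt_v3 input_shapes tt_core_isparam (perf_report_sample_tt_v3 input_shapes tt_core_isparam)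

-- ===== LEMMAS AND PROOFS =====

-- dims of a zipped (row, flag) list
def pvDims (zs : List (List Int × Bool)) : List Int :=
  (zs.filter (fun p => p.2)).map (fun p => PySem.List.pyGetD p.1 2 0)

-- loop body of A viewed on the zipped element
def pvStepZ (st : Option Int × List Int × Int) (p : List Int × Bool) : Option Int × List Int × Int :=
  let isp := p.2
  if !isp && st.1.isNone then st
  else if isp then
    let d := PySem.List.pyGetD p.1 2 0
    let flops' := match st.1 with
      | some v => st.2.2 + 2 * v * d
      | none => st.2.2
    (some d, st.2.1 ++ [d], flops')
  else st

-- pairwise flops sum starting from a possibly-known previous dim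
def pvPf : Option Int → List Int → Int
  | _, [] => 0
  | none, d :: ds => pvPf (some d) ds
  | some v, d :: ds => 2 * v * d + pvPf (some d) ds

def pvLastO (bv : Option Int) (ds : List Int) : Option Int :=
  match ds.getLast? with
  | some d => some d
  | none => bv

-- the last dim seen after consuming one more param core
theorem pvLastO_cons (bv : Option Int) (d : Int) (ds : List Int) :
    pvLastO bv (d :: ds) = pvLastO (some d) ds := by
  cases ds with
  | nil => simp [pvLastO]
  | cons a t =>
    cases h : (a :: t).getLast? with
    | some x => simp [pvLastO, List.getLast?_cons_cons, h]
    | none => simp [List.getLast?_eq_none_iff] at h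

-- A's index loop over range(len(input_shapes)) equals the fold over the zipped lists
theorem pvRange_zip (input_shapes : List (List Int)) (tt_core_isparam : List Bool)
    (hlen : input_shapes.length ≤ tt_core_isparam.length) :
    ∀ (k : Nat) (st : Option Int × List Int × Int), k ≤ input_shapes.length →
    (PySem.List.pyRange (k : Int) (input_shapes.length : Int) 1).foldl
      (pvStepA input_shapes tt_core_isparam) st
    = ((input_shapes.drop k).zip (tt_core_isparam.drop k)).foldl pvStepZ st := by
  intro k
  induction hn : input_shapes.length - k generalizing k with
  | zero =>
    intro st hk
    have hk' : k = input_shapes.length := by omega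
    subst hk'
    rw [PySem.List.pyRange_one_eq_nil (by exact le_refl _), List.drop_length]
    simp
  | succ n ih =>
    intro st hk
    have hklt : k < input_shapes.length := by omega
    have hklt2 : k < tt_core_isparam.length := by omega
    rw [PySem.List.pyRange_one_cons (by exact_mod_cast hklt)]
    rw [List.drop_eq_getElem_cons hklt, List.drop_eq_getElem_cons hklt2]
    simp only [List.foldl_cons, List.zip_cons_cons]
    have hstep : pvStepA input_shapes tt_core_isparam st (k : Int)
        = pvStepZ st (input_shapes[k], tt_core_isparam[k]) := by
      simp [pvStepA, pvStepZ, PySem.List.pyGetD_natCast, List.getD_eq_getElem?_getD,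
        List.getElem?_eq_getElem hklt, List.getElem?_eq_getElem hklt2]
    rw [hstep]
    have : ((k : Int) + 1) = ((k + 1 : Nat) : Int) := by push_cast; ring
    rw [this, ih (k + 1) (by omega) _ (by omega)]

-- the zip-fold invariant: final state in terms of pvDims
theorem pvFold_inv (zs : List (List Int × Bool)) :
    ∀ (bv : Option Int) (sizes : List Int) (fl : Int),
    zs.foldl pvStepZ (bv, sizes, fl)
    = (pvLastO bv (pvDims zs), sizes ++ pvDims zs, fl + pvPf bv (pvDims zs)) := by
  induction zs with
  | nil => intro bv sizes fl; simp [pvDims, pvLastO, pvPf]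
  | cons p zs ih =>
    intro bv sizes fl
    obtain ⟨row, isp⟩ := p
    cases isp with
    | false =>
      have hz : pvStepZ (bv, sizes, fl) (row, false) = (bv, sizes, fl) := by
        cases bv <;> simp [pvStepZ]
      simp only [List.foldl_cons, hz, ih]
      simp [pvDims]
    | true =>
      have hdims : pvDims ((row, true) :: zs) = PySem.List.pyGetD row 2 0 :: pvDims zs := by
        simp [pvDims]
      cases bv with
      | none =>
        have hz : pvStepZ (none, sizes, fl) (row, true)
            = (some (PySem.List.pyGetD row 2 0), sizes ++ [PySem.List.pyGetD row 2 0], fl) := by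
          simp [pvStepZ]
        simp only [List.foldl_cons, hz, ih, hdims, Prod.mk.injEq]
        refine ⟨?_, ?_, ?_⟩
        · exact (pvLastO_cons _ _ _).symm
        · simp
        · simp [pvPf]
      | some v =>
        have hz : pvStepZ (some v, sizes, fl) (row, true)
            = (some (PySem.List.pyGetD row 2 0), sizes ++ [PySem.List.pyGetD row 2 0],
               fl + 2 * v * PySem.List.pyGetD row 2 0) := by
          simp [pvStepZ]
        simp only [List.foldl_cons, hz, ih, hdims, Prod.mk.injEq]
        refine ⟨?_, ?_, ?_⟩
        · exact (pvLastO_cons _ _ _).symm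
        · simp
        · simp [pvPf]; ring

-- pvPf from a known previous dim is the adjacent-pairs sum of (v :: ds)
theorem pvPf_some (ds : List Int) : ∀ v : Int,
    pvPf (some v) ds = (((v :: ds).zip ds).map (fun p => 2 * p.1 * p.2)).sum := by
  induction ds with
  | nil => intro v; simp [pvPf]
  | cons d ds ih => intro v; simp [pvPf, ih d]

-- pvPf from none is B's pairwise sum
theorem pvPf_none (ds : List Int) :
    pvPf none ds = ((ds.zip (ds.drop 1)).map (fun p => 2 * p.1 * p.2)).sum := by
  cases ds with
  | nil => simp [pvPf]
  | cons d ds => simp [pvPf, pvPf_some ds d]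

-- ===== VERDICT (by name: the statement is the Claim_ definition above) =====
theorem perf_report_sample_tt_v3_spec : Claim_equal_perf_report_sample_tt_v3 := by
  intro input_shapes tt_core_isparam _ hpre
  unfold Spec_perf_report_sample_tt_v3 perf_report_sample_tt_v3 perf_report_sample_tt_v3_alt
  obtain ⟨hlen, _, _⟩ := hpre
  have h0 := pvRange_zip input_shapes tt_core_isparam hlen 0 (none, [], 0) (by omega)
  simp only [Nat.cast_zero, List.drop_zero] at h0
  rw [h0, pvFold_inv]
  simp [pvDims, pvPf_none]
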